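-- pv_equiv track=rewrite | github.com/djliterat1984/DI-Bootcamp | Week2/Day3/ExcerciseXP/challenges.py | weird_print
-- ===== SOURCE A (Python) =====
-- def weird_print(values:list):
-- 	index = 0
-- 	succes_values = []
-- 	for i in values:
-- 		if i%2 == 0 and index%2 == 0:
-- 			succes_values.append(i)
-- 		index +=1
--
-- 	return succes_values
-- ===== SOURCE B (Python) =====
-- def weird_print(values: list):
--     # select-then-filter: stride slice picks the even indices, one filter keeps even values
--     return [v for v in values[::2] if v % 2 == 0]
-- ===== Notes on version B (the rewrite author's own statement) =====
-- stated objective: simpler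
-- what changed: Replaces A's single interleaved loop with a manual index counter and a compound index+value test by a two-stage pipeline: a stride slice values[::2] selects the even positions structurally, then one filter keeps the even values.
import Mathlib
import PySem

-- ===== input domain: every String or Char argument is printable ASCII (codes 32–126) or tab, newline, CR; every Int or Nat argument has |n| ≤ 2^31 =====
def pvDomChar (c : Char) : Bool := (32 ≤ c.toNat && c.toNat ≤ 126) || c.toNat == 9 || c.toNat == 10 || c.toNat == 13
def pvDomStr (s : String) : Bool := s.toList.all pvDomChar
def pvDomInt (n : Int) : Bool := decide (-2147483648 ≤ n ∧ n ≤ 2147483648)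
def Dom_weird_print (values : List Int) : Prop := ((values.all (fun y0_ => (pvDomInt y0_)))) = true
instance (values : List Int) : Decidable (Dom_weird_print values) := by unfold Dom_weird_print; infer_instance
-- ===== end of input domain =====

-- B replaces A's index-counter loop with a stride-slice selection followed by a single value filter (simpler decomposition, same cost).

-- ===== PORT A =====
def weird_print (values : List Int) : List Int :=
  (values.foldl
    (fun (st : Int × List Int) i =>
      if PySem.Int.mod i 2 == 0 && PySem.Int.mod st.1 2 == 0 then
        (st.1 + 1, st.2 ++ [i])
      else
        (st.1 + 1, st.2))
    (0, [])).2

-- ===== PORT B =====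
def weird_print_alt (values : List Int) : List Int :=
  ((PySem.List.slice? values none none 2).getD []).filter
    (fun v => PySem.Int.mod v 2 == 0)

-- ===== PRECONDITION & SPEC =====
def Spec_weird_print (values : List Int) (out : List Int) : Prop := out = weird_print_alt values
instance (values : List Int) (out : List Int) : Decidable (Spec_weird_print values out) := by unfold Spec_weird_print; infer_instance

-- ===== CLAIM (what is proved, stated in full; the proofs are below) =====
def Claim_equal_weird_print : Prop := ∀ (values : List Int), Dom_weird_print values → Spec_weird_print values (weird_print values)

-- ===== LEMMAS AND PROOFS =====

-- the even-index subsequence, as a structural recursion (proof helper)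
def everyOther : List Int → List Int
  | [] => []
  | [a] => [a]
  | a :: _ :: t => a :: everyOther t

-- A's loop body, named (definitionally equal to the lambda in the port of A)
def stepA (st : Int × List Int) (i : Int) : Int × List Int :=
  if PySem.Int.mod i 2 == 0 && PySem.Int.mod st.1 2 == 0 then
    (st.1 + 1, st.2 ++ [i])
  else
    (st.1 + 1, st.2)

-- Python's xs[::2] is exactly everyOther xs
lemma slice2_eq (xs : List Int) : PySem.List.slice? xs none none 2 = some (everyOther xs) := by
  have h : ∀ (xs : List Int),
      List.filterMap (fun x : Nat => xs[((2:Int) * (x:Int)).toNat]?)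
        (List.range (if 0 < xs.length then (((xs.length : Int) + 2 - 1) / 2).toNat else 0))
      = everyOther xs := by
    intro xs
    induction xs using everyOther.induct with
    | case1 => simp [everyOther]
    | case2 a => simp [everyOther]
    | case3 a b t ih =>
      have hc : (if 0 < (a :: b :: t).length then ((((a :: b :: t).length : Int) + 2 - 1) / 2).toNat else 0)
          = (if 0 < t.length then (((t.length : Int) + 2 - 1) / 2).toNat else 0) + 1 := by
        simp only [List.length_cons]
        split_ifs <;> omega
      rw [hc, List.range_succ_eq_map, List.filterMap_cons, List.filterMap_map]
      have hhead : ((a :: b :: t)[((2:Int) * ((0:Nat):Int)).toNat]?) = some a := by norm_num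
      rw [hhead]
      simp only [everyOther]
      refine congrArg (a :: ·) ?_
      rw [← ih]
      apply List.filterMap_congr
      intro x _
      have h1 : ((2:Int) * ((Nat.succ x : Nat) : Int)).toNat = ((2:Int) * (x:Int)).toNat + 1 + 1 := by
        push_cast; omega
      simp only [Function.comp_apply]
      rw [h1, List.getElem?_cons_succ, List.getElem?_cons_succ]
  simp only [PySem.List.slice?, PySem.List.sliceIndices]
  norm_num
  exact h xs

-- A's fold, with the accumulator pulled out and an even starting index, is filter ∘ everyOther
lemma foldA_eq (xs : List Int) : ∀ (index : Int) (acc : List Int), index % 2 = 0 →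
    (xs.foldl stepA (index, acc)).2
    = acc ++ (everyOther xs).filter (fun v => PySem.Int.mod v 2 == 0) := by
  induction xs using everyOther.induct with
  | case1 => intro index acc _; simp [everyOther]
  | case2 a =>
    intro index acc hidx
    by_cases ha : a % 2 = 0 <;>
      simp [stepA, everyOther, hidx, ha]
  | case3 a b t ih =>
    intro index acc hidx
    have hodd : ¬ ((index + 1) % 2 = 0) := by omega
    have heven : (index + 1 + 1) % 2 = 0 := by omega
    rw [List.foldl_cons, List.foldl_cons]
    by_cases ha : a % 2 = 0
    · have h1 : stepA (index, acc) a = (index + 1, acc ++ [a]) := by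
        simp [stepA, hidx, ha]
      have h2 : stepA (index + 1, acc ++ [a]) b = (index + 1 + 1, acc ++ [a]) := by
        simp [stepA, hodd]
      rw [h1, h2, ih (index + 1 + 1) (acc ++ [a]) heven]
      simp [everyOther, ha]
    · have h1 : stepA (index, acc) a = (index + 1, acc) := by
        simp [stepA, ha]
      have h2 : stepA (index + 1, acc) b = (index + 1 + 1, acc) := by
        simp [stepA, hodd]
      rw [h1, h2, ih (index + 1 + 1) acc heven]
      simp [everyOther, ha]

-- ===== VERDICT (by name: the statement is the Claim_ definition above) =====
theorem weird_print_spec : Claim_equal_weird_print := by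
  intro values _
  unfold Spec_weird_print weird_print weird_print_alt
  rw [slice2_eq]
  have hstep : (fun (st : Int × List Int) i =>
      if PySem.Int.mod i 2 == 0 && PySem.Int.mod st.1 2 == 0 then
        (st.1 + 1, st.2 ++ [i])
      else
        (st.1 + 1, st.2)) = stepA := rfl
  rw [hstep]
  simpa using foldA_eq values 0 [] (by norm_num)
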